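-- pv_equiv track=rewrite | github.com/PuninskiyID/Aois | Aois_lab_8/py/associatmemory.py | Comparison
-- ===== SOURCE A (Python) =====
-- import typing
--
-- def Comparison(firstWord: typing.List[int], secondWord: typing.List[int]) -> bool:
--     gVariable, lVariable = 0, 0
--     prev_g_Variable, prev_l_Variable = 0, 0
--
--     for i in range(len(firstWord)):
--         gVariable = prev_g_Variable or (not firstWord[i] and secondWord[i] and not prev_l_Variable)
--         lVariable = prev_l_Variable or (firstWord[i] and not secondWord[i] and not prev_g_Variable)
--         prev_g_Variable, prev_l_Variable = gVariable, lVariable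
--
--     return gVariable
-- ===== SOURCE B (Python) =====
-- def Comparison(firstWord, secondWord):
--     for i in range(len(firstWord)):
--         if bool(firstWord[i]) != bool(secondWord[i]):
--             return not firstWord[i]
--     return False
-- ===== Notes on version B (the rewrite author's own statement) =====
-- stated objective: simpler
-- what changed: Replaced A's branchless two-flag (greater/less) carry-propagation sweep over the whole array by a find-first-truthiness-difference scan that returns immediately at the first differing position.
-- outside the precondition, e.g. on Comparison([], []): A returns 0, B returns False; on Comparison([0], [0]): A returns 0, B returns False; on Comparison([1, 1], [0]): A returns False, B returns False
import Mathlib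
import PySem

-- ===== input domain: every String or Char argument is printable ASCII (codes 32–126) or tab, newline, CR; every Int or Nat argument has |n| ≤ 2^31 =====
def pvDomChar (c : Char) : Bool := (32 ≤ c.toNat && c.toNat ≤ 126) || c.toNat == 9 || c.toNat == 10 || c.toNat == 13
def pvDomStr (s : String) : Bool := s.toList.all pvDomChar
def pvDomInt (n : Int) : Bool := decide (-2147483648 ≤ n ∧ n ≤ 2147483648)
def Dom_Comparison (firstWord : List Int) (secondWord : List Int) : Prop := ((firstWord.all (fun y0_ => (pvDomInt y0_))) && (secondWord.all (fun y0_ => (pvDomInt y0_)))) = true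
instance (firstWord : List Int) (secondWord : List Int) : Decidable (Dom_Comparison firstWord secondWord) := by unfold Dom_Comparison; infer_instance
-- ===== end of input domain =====

-- B replaces A's branchless two-flag carry-propagation sweep by an early-returning
-- find-first-truthiness-difference scan (objective: simpler).


-- ===== PORT A =====
-- one loop step: g = prev_g or (not fw[i] and sw[i] and not prev_l);
--                l = prev_l or (fw[i] and not sw[i] and not prev_g)
-- (Python truthiness of an int x is x ≠ 0; inside Pre_ every index is in range and
--  every truthy/falsy value A builds coincides with this Bool)
def stepA (firstWord : List Int) (secondWord : List Int) (st : Bool × Bool) (i : Nat) : Bool × Bool :=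
  let g := st.1 || (decide (firstWord.getD i 0 = 0) && decide (secondWord.getD i 0 ≠ 0) && !st.2)
  let l := st.2 || (decide (firstWord.getD i 0 ≠ 0) && decide (secondWord.getD i 0 = 0) && !st.1)
  (g, l)

def Comparison (firstWord : List Int) (secondWord : List Int) : Bool :=
  ((List.range firstWord.length).foldl (stepA firstWord secondWord) (false, false)).1

-- ===== PORT B =====
-- the 'for i in range(len(firstWord))' loop with early return, as index recursion
def altGo (firstWord : List Int) (secondWord : List Int) (i : Nat) : Bool :=
  if _h : i < firstWord.length then
    if (decide (firstWord.getD i 0 ≠ 0)) != (decide (secondWord.getD i 0 ≠ 0)) then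
      decide (firstWord.getD i 0 = 0)
    else altGo firstWord secondWord (i + 1)
  else false
termination_by firstWord.length - i

def Comparison_alt (firstWord : List Int) (secondWord : List Int) : Bool :=
  altGo firstWord secondWord 0

-- ===== PRECONDITION & SPEC =====
-- Pre_ excludes (a) secondWord shorter than firstWord, where A in general raises
-- IndexError, and (b) empty firstWord or a last compared pair (0, 0), where A can
-- return the int 0 instead of a bool (a value outside the declared return type);
-- both excluded kinds keep A's value unclaimable, though A does return on a few of them.
def Pre_Comparison (firstWord : List Int) (secondWord : List Int) : Prop :=
  firstWord ≠ [] ∧ firstWord.length ≤ secondWord.length ∧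
    ¬(firstWord.getD (firstWord.length - 1) 0 = 0 ∧ secondWord.getD (firstWord.length - 1) 0 = 0)
instance (firstWord : List Int) (secondWord : List Int) : Decidable (Pre_Comparison firstWord secondWord) := by
  unfold Pre_Comparison; infer_instance

def pvWitness_Comparison : List Int × List Int := ([1, 0], [0, 1])

def Spec_Comparison (firstWord : List Int) (secondWord : List Int) (out : Bool) : Prop := out = Comparison_alt firstWord secondWord
instance (firstWord : List Int) (secondWord : List Int) (out : Bool) : Decidable (Spec_Comparison firstWord secondWord out) := by unfold Spec_Comparison; infer_instance

-- ===== CLAIM (what is proved, stated in full; the proofs are below) =====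
def Claim_equal_Comparison : Prop := ∀ (firstWord : List Int) (secondWord : List Int), Dom_Comparison firstWord secondWord → Pre_Comparison firstWord secondWord → Spec_Comparison firstWord secondWord (Comparison firstWord secondWord)

-- ===== LEMMAS AND PROOFS =====

-- B's scan, phrased over an explicit list of indices
def scanIdx (firstWord : List Int) (secondWord : List Int) : List Nat → Bool
  | [] => false
  | i :: t =>
    if (decide (firstWord.getD i 0 ≠ 0)) != (decide (secondWord.getD i 0 ≠ 0)) then
      decide (firstWord.getD i 0 = 0)
    else scanIdx firstWord secondWord t

-- A's two-flag fold, from any state, computes g ∨ (¬l ∧ first-difference-scan)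
theorem foldA_eq (firstWord secondWord : List Int) :
    ∀ (idxs : List Nat) (g l : Bool),
      (idxs.foldl (stepA firstWord secondWord) (g, l)).1
        = (g || (!l && scanIdx firstWord secondWord idxs)) := by
  intro idxs
  induction idxs with
  | nil => intro g l; simp [scanIdx]
  | cons i t ih =>
    intro g l
    by_cases hf : firstWord[i]?.getD 0 = 0 <;>
      by_cases hs : secondWord[i]?.getD 0 = 0 <;>
        cases g <;> cases l <;>
          simp [stepA, scanIdx, List.getD, hf, hs, ih]

-- B's index recursion equals the scan over the remaining indices
theorem altGo_eq (firstWord secondWord : List Int) :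
    ∀ (k i : Nat), firstWord.length - i = k →
      altGo firstWord secondWord i
        = scanIdx firstWord secondWord (List.range' i k) := by
  intro k
  induction k with
  | zero =>
    intro i hk
    rw [altGo]
    simp only [List.range']
    have : ¬ i < firstWord.length := by omega
    simp [this, scanIdx]
  | succ k ih =>
    intro i hk
    have hlt : i < firstWord.length := by omega
    rw [altGo]
    simp only [List.range', scanIdx]
    rw [ih (i + 1) (by omega)]
    simp [hlt]

theorem comparison_eq_scan (firstWord secondWord : List Int) :
    Comparison firstWord secondWord
      = scanIdx firstWord secondWord (List.range firstWord.length) := by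
  unfold Comparison
  rw [foldA_eq]
  simp

theorem comparison_alt_eq_scan (firstWord secondWord : List Int) :
    Comparison_alt firstWord secondWord
      = scanIdx firstWord secondWord (List.range firstWord.length) := by
  unfold Comparison_alt
  rw [altGo_eq firstWord secondWord (firstWord.length - 0) 0 rfl]
  simp [List.range_eq_range']

-- ===== VERDICT (by name: the statement is the Claim_ definition above) =====
theorem Comparison_spec : Claim_equal_Comparison := by
  intro firstWord secondWord _ _
  unfold Spec_Comparison
  rw [comparison_eq_scan, comparison_alt_eq_scan]
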